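-- pv_equiv track=rewrite | github.com/skepee-PROTOTYPE/pizzini | content_formatter.py | _add_hashtags
-- ===== SOURCE A (Python) =====
-- from typing import List, Dict, Tuple
--
-- def _add_hashtags(post: str, hashtags: List[str], char_limit: int) -> str:
--     """Add hashtags to post if they fit"""
--     if not hashtags:
--         return post
--
--     hashtag_string = " " + " ".join(hashtags)
--
--     if len(post + hashtag_string) <= char_limit:
--         return post + hashtag_string
--     else:
--         # Try to fit as many hashtags as possible
--         fitted_hashtags = []
--         for hashtag in hashtags:
--             test_string = post + " " + " ".join(fitted_hashtags + [hashtag])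
--             if len(test_string) <= char_limit:
--                 fitted_hashtags.append(hashtag)
--             else:
--                 break
--
--         if fitted_hashtags:
--             return post + " " + " ".join(fitted_hashtags)
--         else:
--             return post
-- ===== SOURCE B (Python) =====
-- def _add_hashtags(post: str, hashtags: list, char_limit: int) -> str:
--     """Add hashtags to post if they fit (binary search over prefix sums)."""
--     if not hashtags:
--         return post
--     # pref[k] = extra length added by the first k hashtags (leading space included)
--     pref = [0]
--     for h in hashtags:
--         pref.append(pref[-1] + len(h) + 1)
--     # lengths are strictly increasing, so "fits" is monotone: binary-search the
--     # largest k with len(post) + pref[k] <= char_limit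
--     lo, hi = 0, len(hashtags)
--     while lo < hi:
--         mid = (lo + hi + 1) // 2
--         if len(post) + pref[mid] <= char_limit:
--             lo = mid
--         else:
--             hi = mid - 1
--     if lo == 0:
--         return post
--     return post + " " + " ".join(hashtags[:lo])
-- ===== Notes on version B (the rewrite author's own statement) =====
-- stated objective: alternative
-- what changed: Replaces the greedy left-to-right scan that re-joins the whole candidate string at every step with a prefix-sum table of lengths plus a binary search for the largest prefix count that fits.
import Mathlib
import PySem

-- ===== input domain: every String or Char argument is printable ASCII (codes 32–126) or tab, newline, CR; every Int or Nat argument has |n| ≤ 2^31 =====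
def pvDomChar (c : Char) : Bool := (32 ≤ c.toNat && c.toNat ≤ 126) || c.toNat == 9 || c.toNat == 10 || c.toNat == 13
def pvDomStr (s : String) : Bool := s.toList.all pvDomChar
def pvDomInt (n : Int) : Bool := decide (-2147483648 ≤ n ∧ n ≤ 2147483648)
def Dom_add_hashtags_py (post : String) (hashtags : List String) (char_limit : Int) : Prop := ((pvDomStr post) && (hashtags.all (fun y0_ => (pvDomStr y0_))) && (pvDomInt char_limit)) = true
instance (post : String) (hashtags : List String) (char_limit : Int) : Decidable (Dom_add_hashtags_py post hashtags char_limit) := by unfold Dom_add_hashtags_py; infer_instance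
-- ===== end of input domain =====

-- B replaces A's greedy scan (re-joining the candidate string each step) with a
-- prefix-sum table of lengths and a binary search for the largest fitting prefix.


-- ===== PORT A =====
-- the for-loop with break: fitted accumulates, first failing test returns fitted
def aFitLoop (post : String) (char_limit : Int) (fitted : List String) : List String → List String
  | [] => fitted
  | hashtag :: rest =>
    let test_string := post ++ " " ++ PySem.Str.join " " (fitted ++ [hashtag])
    if PySem.Str.len test_string ≤ char_limit then
      aFitLoop post char_limit (fitted ++ [hashtag]) rest
    else
      fitted

def add_hashtags_py (post : String) (hashtags : List String) (char_limit : Int) : String :=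
  if hashtags = [] then post
  else
    let hashtag_string := " " ++ PySem.Str.join " " hashtags
    if PySem.Str.len (post ++ hashtag_string) ≤ char_limit then post ++ hashtag_string
    else
      let fitted := aFitLoop post char_limit [] hashtags
      if fitted ≠ [] then post ++ " " ++ PySem.Str.join " " fitted
      else post

-- ===== PORT B =====
-- pref.append(pref[-1] + len(h) + 1) for each hashtag
def bPrefLoop (pref : List Int) : List String → List Int
  | [] => pref
  | h :: rest => bPrefLoop (pref ++ [PySem.List.pyGetD pref (-1) 0 + PySem.Str.len h + 1]) rest

-- while lo < hi: mid = (lo+hi+1)//2; fit → lo = mid else hi = mid-1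
def bSearch (plen : Int) (pref : List Int) (char_limit : Int) (lo hi : Nat) : Nat :=
  if lo < hi then
    -- mid = (lo + hi + 1) // 2, inlined
    if plen + PySem.List.pyGetD pref (((lo + hi + 1) / 2 : Nat) : Int) 0 ≤ char_limit then
      bSearch plen pref char_limit ((lo + hi + 1) / 2) hi
    else
      bSearch plen pref char_limit lo ((lo + hi + 1) / 2 - 1)
  else lo
termination_by hi - lo
decreasing_by all_goals omega

def add_hashtags_py_alt (post : String) (hashtags : List String) (char_limit : Int) : String :=
  if hashtags = [] then post
  else
    let pref := bPrefLoop [0] hashtags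
    let lo := bSearch (PySem.Str.len post) pref char_limit 0 hashtags.length
    if lo = 0 then post
    else post ++ " " ++ PySem.Str.join " " (PySem.List.slice hashtags none (some (lo : Int)))

-- ===== PRECONDITION & SPEC =====
def Spec_add_hashtags_py (post : String) (hashtags : List String) (char_limit : Int) (out : String) : Prop := out = add_hashtags_py_alt post hashtags char_limit
instance (post : String) (hashtags : List String) (char_limit : Int) (out : String) : Decidable (Spec_add_hashtags_py post hashtags char_limit out) := by unfold Spec_add_hashtags_py; infer_instance

-- ===== CLAIM (what is proved, stated in full; the proofs are below) =====
def Claim_equal_add_hashtags_py : Prop := ∀ (post : String) (hashtags : List String) (char_limit : Int), Dom_add_hashtags_py post hashtags char_limit → Spec_add_hashtags_py post hashtags char_limit (add_hashtags_py post hashtags char_limit)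

-- ===== LEMMAS AND PROOFS =====

-- extra length contributed by one hashtag (separating space included)
def pvG (h : String) : Int := PySem.Str.len h + 1

-- total extra length of the first k hashtags
def pvS (hashtags : List String) (k : Nat) : Int := ((hashtags.take k).map pvG).sum

-- "k ≥ 1 and the first k hashtags fit"
def pvQ (post : String) (hashtags : List String) (c : Int) (k : Nat) : Prop :=
  1 ≤ k ∧ PySem.Str.len post + pvS hashtags k ≤ c

-- the winning prefix count: the largest k ≤ n with pvQ, else 0
def pvK (post : String) (hashtags : List String) (c : Int) : Nat :=
  Nat.findGreatest (fun k => 1 ≤ k ∧ PySem.Str.len post + pvS hashtags k ≤ c) hashtags.length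

theorem pvK_eq_iff (post : String) (hashtags : List String) (c : Int) (m : Nat) :
    pvK post hashtags c = m ↔
      m ≤ hashtags.length ∧ (m ≠ 0 → pvQ post hashtags c m) ∧
        ∀ k, m < k → k ≤ hashtags.length → ¬ pvQ post hashtags c k := by
  unfold pvK pvQ
  rw [Nat.findGreatest_eq_iff]

theorem pvG_nonneg (h : String) : 0 ≤ pvG h := by
  simp only [pvG, PySem.Str.len_eq]
  positivity

theorem pvS_zero (hashtags : List String) : pvS hashtags 0 = 0 := by
  simp [pvS]

theorem pvS_mono (hashtags : List String) {i j : Nat} (h : i ≤ j) :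
    pvS hashtags i ≤ pvS hashtags j := by
  unfold pvS
  have hsplit : hashtags.take j = hashtags.take i ++ (hashtags.take j).drop i := by
    conv_lhs => rw [← List.take_append_drop i (hashtags.take j)]
    rw [List.take_take, Nat.min_eq_left h]
  rw [hsplit, List.map_append, List.sum_append]
  have : 0 ≤ (((hashtags.take j).drop i).map pvG).sum := by
    apply List.sum_nonneg
    intro x hx
    obtain ⟨y, _, rfl⟩ := List.mem_map.1 hx
    exact pvG_nonneg y
  omega

theorem pvJoinChars : ∀ (t : List (List Char)) (x : List Char),
    ((PySem.Chars.join [' '] (x :: t)).length : Int)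
      = x.length + (t.map (fun cs => (cs.length : Int) + 1)).sum
  | [], x => by simp [PySem.Chars.join_singleton]
  | b :: t, x => by
    rw [PySem.Chars.join_cons_cons]
    simp only [List.length_append, List.map_cons, List.sum_cons, List.length_singleton]
    have := pvJoinChars t b
    push_cast at this ⊢
    omega

theorem pvJoinLen (post : String) (l : List String) (h : l ≠ []) :
    PySem.Str.len (post ++ " " ++ PySem.Str.join " " l) =
      PySem.Str.len post + (l.map pvG).sum := by
  obtain ⟨x, t, rfl⟩ := List.exists_cons_of_ne_nil h
  rw [PySem.Str.len_append, PySem.Str.len_append]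
  have hj : PySem.Str.len (PySem.Str.join " " (x :: t))
      = ((PySem.Chars.join [' '] (x.toList :: t.map String.toList)).length : Int) := by
    simp only [PySem.Str.len_eq]
    rw [PySem.Str.toList_join]
    rfl
  rw [hj, pvJoinChars]
  have hmap : (t.map String.toList).map (fun cs => (cs.length : Int) + 1) = t.map pvG := by
    simp [pvG, PySem.Str.len_eq, Function.comp]
  rw [hmap]
  simp [pvG, PySem.Str.len_eq]
  ring

-- the exact prefix sums B's first loop builds
def pvSums (a : Int) : List String → List Int
  | [] => []
  | h :: t => (a + pvG h) :: pvSums (a + pvG h) t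

theorem bPrefLoop_eq : ∀ (l : List String) (acc : List Int) (a : Int),
    bPrefLoop (acc ++ [a]) l = acc ++ a :: pvSums a l
  | [], acc, a => by simp [bPrefLoop, pvSums]
  | h :: t, acc, a => by
    rw [bPrefLoop]
    rw [PySem.List.pyGetD_neg_one_append_singleton]
    have harg : acc ++ [a] ++ [a + PySem.Str.len h + 1] = (acc ++ [a]) ++ [a + pvG h] := by
      simp [pvG]; ring
    rw [harg, bPrefLoop_eq t (acc ++ [a]) (a + pvG h)]
    simp [pvSums]

theorem pvS_succ_cons (h : String) (t : List String) (k : Nat) :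
    pvS (h :: t) (k + 1) = pvG h + pvS t k := by
  simp [pvS, List.take_succ_cons]

theorem pvSums_getD : ∀ (l : List String) (a : Int) (k : Nat), k ≤ l.length →
    (a :: pvSums a l).getD k 0 = a + pvS l k
  | l, a, 0, _ => by simp [pvS_zero]
  | [], a, k + 1, hk => by simp at hk
  | h :: t, a, k + 1, hk => by
    show (pvSums a (h :: t)).getD k 0 = _
    rw [pvSums]
    rw [pvSums_getD t (a + pvG h) k (by simpa using hk)]
    rw [pvS_succ_cons]
    ring

theorem aFitLoop_eq (post : String) (c : Int) (hashtags : List String) :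
    ∀ (l : List String) (j : Nat), l = hashtags.drop j → j ≤ hashtags.length →
      (j = 0 ∨ pvQ post hashtags c j) →
      aFitLoop post c (hashtags.take j) l = hashtags.take (pvK post hashtags c)
  | [], j, hl, hj, hq => by
    have hjn : j = hashtags.length := by
      have := congrArg List.length hl
      simp at this
      omega
    subst hjn
    rw [aFitLoop]
    congr 1
    symm
    rw [pvK_eq_iff]
    refine ⟨le_refl _, fun hne => ?_, fun k hk1 hk2 => by omega⟩
    rcases hq with h0 | hq
    · exact absurd h0 hne
    · exact hq
  | h :: t, j, hl, hj, hq => by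
    have hjlt : j < hashtags.length := by
      by_contra hge
      rw [List.drop_eq_nil_of_le (by omega)] at hl
      simp at hl
    have hdrop := List.drop_eq_getElem_cons hjlt
    rw [hdrop] at hl
    obtain ⟨hh, ht⟩ : h = hashtags[j] ∧ t = hashtags.drop (j + 1) := by
      injection hl with h1 h2; exact ⟨h1, h2⟩
    rw [aFitLoop]
    have htake : hashtags.take j ++ [h] = hashtags.take (j + 1) := by
      rw [hh]; exact List.take_append_getElem hjlt
    have hne : hashtags.take (j + 1) ≠ [] := by
      have : (hashtags.take (j + 1)).length = j + 1 := by
        rw [List.length_take]; omega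
      intro hcon; rw [hcon] at this; simp at this
    have hlen : PySem.Str.len (post ++ " " ++ PySem.Str.join " " (hashtags.take j ++ [h]))
        = PySem.Str.len post + pvS hashtags (j + 1) := by
      rw [htake, pvJoinLen post _ hne]; rfl
    simp only [hlen]
    split_ifs with hfit
    · rw [htake]
      exact aFitLoop_eq post c hashtags t (j + 1) ht (by omega) (Or.inr ⟨by omega, hfit⟩)
    · congr 1
      symm
      rw [pvK_eq_iff]
      refine ⟨by omega, fun hne0 => ?_, fun k hk1 hk2 hQ => ?_⟩
      · rcases hq with h0 | hq
        · exact absurd h0 hne0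
        · exact hq
      · have hmono := pvS_mono hashtags (show j + 1 ≤ k by omega)
        have := hQ.2
        omega

theorem bSearch_eq (post : String) (hashtags : List String) (c : Int) :
    ∀ (d lo hi : Nat), hi - lo = d → lo ≤ hi → hi ≤ hashtags.length →
      (lo = 0 ∨ pvQ post hashtags c lo) →
      (∀ k, hi < k → k ≤ hashtags.length → ¬ pvQ post hashtags c k) →
      bSearch (PySem.Str.len post) (bPrefLoop [0] hashtags) c lo hi = pvK post hashtags c := by
  intro d
  induction d using Nat.strong_induction_on with
  | _ d ih =>
    intro lo hi hd hlohi hhin hlo hhi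
    rw [bSearch]
    by_cases hlt : lo < hi
    rw [if_pos hlt]
    · have hmid1 : lo < (lo + hi + 1) / 2 := by omega
      have hmid2 : (lo + hi + 1) / 2 ≤ hi := by omega
      have hpref : bPrefLoop [0] hashtags = 0 :: pvSums 0 hashtags := by
        have := bPrefLoop_eq hashtags [] 0
        simpa using this
      have hget : PySem.List.pyGetD (bPrefLoop [0] hashtags) (((lo + hi + 1) / 2 : Nat) : Int) 0
          = pvS hashtags ((lo + hi + 1) / 2) := by
        rw [hpref, PySem.List.pyGetD_natCast, pvSums_getD hashtags 0 _ (by omega)]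
        ring
      rw [hget]
      split_ifs with hfit
      · exact ih (hi - (lo + hi + 1) / 2) (by omega) ((lo + hi + 1) / 2) hi (by omega)
          (by omega) hhin (Or.inr ⟨by omega, hfit⟩) hhi
      · refine ih ((lo + hi + 1) / 2 - 1 - lo) (by omega) lo ((lo + hi + 1) / 2 - 1) (by omega)
          (by omega) (by omega) hlo (fun k hk1 hk2 hQ => ?_)
        by_cases hkhi : hi < k
        · exact hhi k hkhi hk2 hQ
        · have hmono := pvS_mono hashtags (show (lo + hi + 1) / 2 ≤ k by omega)
          have := hQ.2
          omega
    · rw [if_neg hlt]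
      have hlohi' : lo = hi := by omega
      symm
      rw [pvK_eq_iff]
      refine ⟨by omega, fun hne => ?_, fun k hk1 hk2 => hhi k (by omega) hk2⟩
      rcases hlo with h0 | hq
      · exact absurd h0 hne
      · exact hq

-- ===== VERDICT (by name: the statement is the Claim_ definition above) =====
theorem add_hashtags_py_spec : Claim_equal_add_hashtags_py := by
  intro post hashtags c _
  unfold Spec_add_hashtags_py add_hashtags_py add_hashtags_py_alt
  by_cases hnil : hashtags = []
  · simp [hnil]
  · simp only [if_neg hnil]
    have hn : 0 < hashtags.length := List.length_pos_iff.2 hnil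
    have hK : bSearch (PySem.Str.len post) (bPrefLoop [0] hashtags) c 0 hashtags.length
        = pvK post hashtags c :=
      bSearch_eq post hashtags c hashtags.length 0 hashtags.length (by omega) (by omega)
        (le_refl _) (Or.inl rfl) (fun k hk1 hk2 _ => by omega)
    have hfull : PySem.Str.len (post ++ (" " ++ PySem.Str.join " " hashtags))
        = PySem.Str.len post + pvS hashtags hashtags.length := by
      rw [← String.append_assoc, pvJoinLen post hashtags hnil]
      unfold pvS
      rw [List.take_length]
    have hslice : ∀ m : Nat, PySem.List.slice hashtags none (some (m : Int)) = hashtags.take m :=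
      fun m => PySem.List.slice_to_natCast hashtags m
    rw [hfull, hK]
    have hloop : aFitLoop post c [] hashtags = hashtags.take (pvK post hashtags c) := by
      have := aFitLoop_eq post c hashtags hashtags 0 (by simp) (by omega) (Or.inl rfl)
      simpa using this
    rw [hloop]
    by_cases hfit : PySem.Str.len post + pvS hashtags hashtags.length ≤ c
    · rw [if_pos hfit]
      have hKn : pvK post hashtags c = hashtags.length := by
        rw [pvK_eq_iff]
        exact ⟨le_refl _, fun _ => ⟨by omega, hfit⟩, fun k hk1 hk2 => by omega⟩
      rw [hKn, if_neg (by omega), hslice, List.take_length, String.append_assoc]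
    · rw [if_neg hfit]
      by_cases hKz : pvK post hashtags c = 0
      · rw [hKz]
        simp
      · have hKle : pvK post hashtags c ≤ hashtags.length :=
          ((pvK_eq_iff post hashtags c (pvK post hashtags c)).1 rfl).1
        have htk : hashtags.take (pvK post hashtags c) ≠ [] := by
          intro hcon
          rcases List.take_eq_nil_iff.1 hcon with h0 | h0
          · exact hKz h0
          · exact hnil h0
        rw [if_pos htk, if_neg hKz, hslice]
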